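-- pv_equiv track=rewrite | github.com/yanzhenxing123/algorithms | 秋招笔试/美团/triplet_count_breakthrough.py | count_triplets_final_breakthrough
-- ===== SOURCE A (Python) =====
-- import bisect
--
-- def count_triplets_final_breakthrough(arr):
--     """
--     最终突破版本：结合所有可能的优化
--     """
--     n = len(arr)
--     count = 0
--
--     # 对于每个位置j
--     for j in range(1, n - 1):
--         aj = arr[j]
--
--         # 收集左边大于aj的元素
--         left_greater = []
--         for i in range(j):
--             if arr[i] > aj:
--                 left_greater.append(arr[i])
--
--         # 收集右边大于aj的元素并排序
--         right_greater = []
--         for k in range(j + 1, n):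
--             if arr[k] > aj:
--                 right_greater.append(arr[k])
--
--         # 排序右边元素
--         right_greater.sort()
--
--         # 对于每个左边的元素ai
--         for ai in left_greater:
--             # 使用bisect模块的二分查找
--             count += bisect.bisect_left(right_greater, ai)
--
--     return count
-- ===== SOURCE B (Python) =====
-- def count_triplets_final_breakthrough(arr):
--     n = len(arr)
--     total = 0
--     for k in range(n):
--         ak = arr[k]
--         bigger = 0
--         for j in range(k):
--             if arr[j] < ak:
--                 total += bigger
--             if arr[j] > ak:
--                 bigger += 1
--     return total
-- ===== Notes on version B (the rewrite author's own statement) =====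
-- stated objective: faster
-- what changed: Instead of A's per-middle-element pass that builds, sorts and binary-searches left/right 'greater' lists, B pivots on the rightmost index and maintains a single running counter of earlier larger elements, so no intermediate lists, sorting or bisect remain.
import Mathlib
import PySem

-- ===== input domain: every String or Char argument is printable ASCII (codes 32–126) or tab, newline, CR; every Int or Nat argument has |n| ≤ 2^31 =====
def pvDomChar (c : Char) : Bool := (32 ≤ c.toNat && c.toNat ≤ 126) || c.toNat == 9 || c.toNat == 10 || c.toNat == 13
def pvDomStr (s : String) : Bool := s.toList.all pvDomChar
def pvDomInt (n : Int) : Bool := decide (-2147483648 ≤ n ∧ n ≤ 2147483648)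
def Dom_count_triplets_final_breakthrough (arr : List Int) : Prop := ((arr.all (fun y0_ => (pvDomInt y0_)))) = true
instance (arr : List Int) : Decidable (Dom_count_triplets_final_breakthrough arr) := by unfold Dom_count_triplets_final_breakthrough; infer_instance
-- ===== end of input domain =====

-- B replaces A's per-middle-element filter/sort/bisect machinery by a plain prefix-counting
-- double loop pivoting on the rightmost index (objective: simpler; same count, no sorting).

-- ===== PORT A =====
def count_triplets_final_breakthrough (arr : List Int) : Int :=
  let n : Int := arr.length
  (PySem.List.pyRange 1 (n - 1) 1).foldl
    (fun count j =>
      let aj := PySem.List.pyGetD arr j 0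
      let left_greater := (PySem.List.pyRange 0 j 1).foldl
        (fun acc i => if PySem.List.pyGetD arr i 0 > aj then acc ++ [PySem.List.pyGetD arr i 0] else acc) []
      let right_greater := (PySem.List.pyRange (j + 1) n 1).foldl
        (fun acc k => if PySem.List.pyGetD arr k 0 > aj then acc ++ [PySem.List.pyGetD arr k 0] else acc) []
      let right_sorted := PySem.List.sorted right_greater (fun x => x)
      left_greater.foldl (fun c ai => c + (PySem.List.bisectLeft right_sorted ai : Int)) count)
    0

-- ===== PORT B =====
def count_triplets_final_breakthrough_alt (arr : List Int) : Int :=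
  let n : Int := arr.length
  (PySem.List.pyRange 0 n 1).foldl
    (fun total k =>
      let ak := PySem.List.pyGetD arr k 0
      ((PySem.List.pyRange 0 k 1).foldl
        (fun st j =>
          let aj := PySem.List.pyGetD arr j 0
          let st' := if aj < ak then (st.1 + st.2, st.2) else st
          if aj > ak then (st'.1, st'.2 + 1) else st')
        (total, 0)).1)
    0

-- ===== PRECONDITION & SPEC =====
def Spec_count_triplets_final_breakthrough (arr : List Int) (out : Int) : Prop := out = count_triplets_final_breakthrough_alt arr
instance (arr : List Int) (out : Int) : Decidable (Spec_count_triplets_final_breakthrough arr out) := by unfold Spec_count_triplets_final_breakthrough; infer_instance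

-- ===== CLAIM (what is proved, stated in full; the proofs are below) =====
def Claim_equal_count_triplets_final_breakthrough : Prop := ∀ (arr : List Int), Dom_count_triplets_final_breakthrough arr → Spec_count_triplets_final_breakthrough arr (count_triplets_final_breakthrough arr)

-- ===== LEMMAS AND PROOFS =====

-- element at a natural index
def pvA (arr : List Int) (i : ℕ) : Int := arr.getD i 0

-- 0/1 indicator of the counted pattern: arr[j] < arr[k] < arr[i]
def pvG (arr : List Int) (j i k : ℕ) : Int :=
  if pvA arr j < pvA arr k ∧ pvA arr k < pvA arr i then 1 else 0

-- common normal form: guarded sum over the full index cube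
def pvCube (arr : List Int) : Int :=
  ∑ j ∈ Finset.range arr.length, ∑ i ∈ Finset.range arr.length, ∑ k ∈ Finset.range arr.length,
    if i < j ∧ j < k then pvG arr j i k else 0

-- A's per-middle-index contribution
def pvTA (arr : List Int) (j : ℕ) : Int :=
  ∑ i ∈ Finset.range j, ∑ k ∈ Finset.Ico (j + 1) arr.length, pvG arr j i k

-- B's per-rightmost-index contribution
def pvS (arr : List Int) (k : ℕ) : Int :=
  ∑ j ∈ Finset.range k,
    if pvA arr j < pvA arr k then
      (((List.range j).countP (fun i => decide (pvA arr k < pvA arr i))) : Int)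
    else 0

-- bisect_left on a sorted list counts the elements strictly below x
theorem pv_bisect_countP (xs : List Int) (x : Int) (h : xs.Pairwise (· ≤ ·)) :
    (PySem.List.bisectLeft xs x : ℕ) = xs.countP (fun y => decide (y < x)) := by
  obtain ⟨hle, hlt, hge⟩ := PySem.List.bisectLeft_spec xs x h
  set r := PySem.List.bisectLeft xs x with hr
  rw [← List.take_append_drop r xs, List.countP_append]
  have h1 : (xs.take r).countP (fun y => decide (y < x)) = (xs.take r).length := by
    rw [List.countP_eq_length]
    intro a ha
    rw [List.mem_iff_getElem] at ha
    obtain ⟨m, hm, rfl⟩ := ha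
    have hmr : m < r := by have := hm; simp [List.length_take] at this; omega
    have hmx : m < xs.length := by have := hm; simp [List.length_take] at this; omega
    rw [List.getElem_take]
    simpa using hlt m hmx hmr
  have h2 : (xs.drop r).countP (fun y => decide (y < x)) = 0 := by
    rw [List.countP_eq_zero]
    intro a ha
    rw [List.mem_iff_getElem] at ha
    obtain ⟨m, hm, rfl⟩ := ha
    have hmx : r + m < xs.length := by have := hm; simp [List.length_drop] at this; omega
    rw [List.getElem_drop]
    have := hge (r + m) hmx (by omega)
    simp; omega
  rw [h1, h2]
  simp [List.length_take]
  omega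

-- sum over a filtered list as a guarded sum
theorem pv_sum_map_filter {α : Type} (p : α → Bool) (h : α → Int) (l : List α) :
    (((l.filter p).map h)).sum = (l.map (fun x => if p x then h x else 0)).sum := by
  induction l with
  | nil => simp
  | cons a l ih => by_cases hp : p a <;> simp [hp, ih]

-- countP as a 0/1 sum over Finset.range
theorem pv_countP_sum (p : ℕ → Bool) (m : ℕ) :
    (((List.range m).countP p : ℕ) : Int) = ∑ i ∈ Finset.range m, if p i then 1 else 0 := by
  rw [← PySem.List.sum_map_ite_one_zero p (List.range m)]
  rfl

-- guarded extension of a truncated sum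
theorem pv_sum_ext (X : ℕ → Int) (k N : ℕ) (hk : k ≤ N) :
    ∑ j ∈ Finset.range k, X j = ∑ j ∈ Finset.range N, if j < k then X j else 0 := by
  have h1 : ∑ j ∈ Finset.range k, (if j < k then X j else 0)
      = ∑ j ∈ Finset.range N, (if j < k then X j else 0) :=
    Finset.sum_subset (by intro x hx; simp only [Finset.mem_range] at hx ⊢; omega)
      (by intro j _ hj; rw [if_neg (by simpa using hj)])
  rw [← h1]
  exact Finset.sum_congr rfl (fun j hj => (if_pos (Finset.mem_range.1 hj)).symm)

-- guarded extension of an Ico sum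
theorem pv_sum_Ico_ext (Y : ℕ → Int) (j N : ℕ) :
    ∑ k ∈ Finset.Ico (j + 1) N, Y k = ∑ k ∈ Finset.range N, if j < k then Y k else 0 := by
  rw [← Finset.sum_filter]
  congr 1
  ext x
  simp only [Finset.mem_Ico, Finset.mem_filter, Finset.mem_range]
  omega

-- the triangular triple sum equals the guarded cube sum
theorem pv_trip_eq_cube (arr : List Int) :
    (∑ k ∈ Finset.range arr.length, ∑ j ∈ Finset.range k, ∑ i ∈ Finset.range j, pvG arr j i k)
      = pvCube arr := by
  unfold pvCube
  set N := arr.length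
  calc ∑ k ∈ Finset.range N, ∑ j ∈ Finset.range k, ∑ i ∈ Finset.range j, pvG arr j i k
      = ∑ k ∈ Finset.range N, ∑ j ∈ Finset.range N, ∑ i ∈ Finset.range N,
          if i < j ∧ j < k then pvG arr j i k else 0 := by
        apply Finset.sum_congr rfl; intro k hk
        rw [pv_sum_ext _ k N (le_of_lt (Finset.mem_range.1 hk))]
        apply Finset.sum_congr rfl; intro j hj
        by_cases hjk : j < k
        · rw [if_pos hjk]
          rw [pv_sum_ext _ j N (le_of_lt (Finset.mem_range.1 hj))]
          apply Finset.sum_congr rfl; intro i _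
          by_cases hij : i < j
          · rw [if_pos hij, if_pos ⟨hij, hjk⟩]
          · rw [if_neg hij, if_neg (by tauto)]
        · rw [if_neg hjk]
          symm
          apply Finset.sum_eq_zero; intro i _
          rw [if_neg (by tauto)]
    _ = ∑ j ∈ Finset.range N, ∑ i ∈ Finset.range N, ∑ k ∈ Finset.range N,
          if i < j ∧ j < k then pvG arr j i k else 0 := by
        rw [Finset.sum_comm]
        exact Finset.sum_congr rfl (fun j _ => Finset.sum_comm)

-- B's inner loop invariant
theorem pv_innerB (arr : List Int) (k m : ℕ) (t b : Int) :
    (List.range m).foldl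
      (fun st j =>
        let aj := pvA arr j
        let st' := if aj < pvA arr k then (st.1 + st.2, st.2) else st
        if aj > pvA arr k then (st'.1, st'.2 + 1) else st')
      (t, b)
    = (t + ∑ j ∈ Finset.range m,
          (if pvA arr j < pvA arr k then
              b + (((List.range j).countP (fun i => decide (pvA arr k < pvA arr i))) : Int)
            else 0),
       b + (((List.range m).countP (fun i => decide (pvA arr k < pvA arr i))) : Int)) := by
  induction m with
  | zero => simp
  | succ m ih =>
    rw [List.range_succ, List.foldl_append, ih, Finset.sum_range_succ, List.countP_append]
    simp only [List.foldl_cons, List.foldl_nil, List.countP_cons, List.countP_nil]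
    rcases lt_trichotomy (pvA arr m) (pvA arr k) with hc | hc | hc
    · have h2 : ¬ (pvA arr k < pvA arr m) := by omega
      simp [hc, h2]
      ring
    · simp [hc]
    · have h2 : ¬ (pvA arr m < pvA arr k) := by omega
      simp [hc, h2]
      ring

-- B computes the sum of its per-k contributions
theorem pv_B_eq_sum (arr : List Int) :
    count_triplets_final_breakthrough_alt arr = ∑ k ∈ Finset.range arr.length, pvS arr k := by
  have main : ∀ (m : ℕ) (t : Int),
      (List.range m).foldl
        (fun (total : Int) (k : ℕ) =>
          ((List.range k).foldl
            (fun (st : Int × Int) (j : ℕ) =>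
              let aj := PySem.List.pyGetD arr (j : Int) 0
              let st' := if aj < PySem.List.pyGetD arr (k : Int) 0 then (st.1 + st.2, st.2) else st
              if aj > PySem.List.pyGetD arr (k : Int) 0 then (st'.1, st'.2 + 1) else st')
            (total, 0)).1)
        t
      = t + ∑ k ∈ Finset.range m, pvS arr k := by
    intro m
    induction m with
    | zero => intro t; simp
    | succ m ih =>
      intro t
      rw [List.range_succ, List.foldl_append, ih, Finset.sum_range_succ]
      simp only [List.foldl_cons, List.foldl_nil]
      simp only [PySem.List.pyGetD_natCast]
      have h := pv_innerB arr m m (t + ∑ k ∈ Finset.range m, pvS arr k) 0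
      refine Eq.trans (congrArg Prod.fst h) ?_
      simp only [zero_add, pvS]
      rw [add_assoc]
  have h0 := main arr.length 0
  unfold count_triplets_final_breakthrough_alt
  simp only [PySem.List.pyRange_zero_natCast, List.foldl_map]
  exact h0.trans (by rw [zero_add])

-- B's per-k contribution as a triangular double sum
theorem pv_S_eq (arr : List Int) (k : ℕ) :
    pvS arr k = ∑ j ∈ Finset.range k, ∑ i ∈ Finset.range j, pvG arr j i k := by
  unfold pvS
  apply Finset.sum_congr rfl
  intro j _
  by_cases h : pvA arr j < pvA arr k
  · rw [if_pos h, pv_countP_sum]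
    apply Finset.sum_congr rfl
    intro i _
    unfold pvG
    by_cases h2 : pvA arr k < pvA arr i
    · rw [if_pos (by simpa using h2), if_pos ⟨h, h2⟩]
    · rw [if_neg (by simpa using h2), if_neg (by tauto)]
  · rw [if_neg h]
    symm
    apply Finset.sum_eq_zero
    intro i _
    unfold pvG
    rw [if_neg (by tauto)]

-- B equals the cube sum
theorem pv_B_eq_cube (arr : List Int) :
    count_triplets_final_breakthrough_alt arr = pvCube arr := by
  rw [pv_B_eq_sum, ← pv_trip_eq_cube]
  exact Finset.sum_congr rfl (fun k _ => pv_S_eq arr k)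

-- A's per-j loop body adds its per-middle-index contribution
theorem pv_bodyA (arr : List Int) (j : ℕ) (count : Int) :
    (let aj := PySem.List.pyGetD arr (j : Int) 0
     let left_greater := (PySem.List.pyRange 0 (j : Int) 1).foldl
       (fun acc i => if PySem.List.pyGetD arr i 0 > aj then acc ++ [PySem.List.pyGetD arr i 0] else acc) []
     let right_greater := (PySem.List.pyRange ((j : Int) + 1) (arr.length : Int) 1).foldl
       (fun acc k => if PySem.List.pyGetD arr k 0 > aj then acc ++ [PySem.List.pyGetD arr k 0] else acc) []
     let right_sorted := PySem.List.sorted right_greater (fun x => x)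
     left_greater.foldl (fun c ai => c + (PySem.List.bisectLeft right_sorted ai : Int)) count)
    = count + pvTA arr j := by
  simp only [PySem.List.pyGetD_natCast]
  -- right list
  rw [PySem.List.pyRange_one ((j : Int) + 1) (arr.length : Int),
      show (((arr.length : Int)) - ((j : Int) + 1)).toNat = arr.length - (j + 1) by omega,
      List.foldl_map]
  have hcast : ∀ u : ℕ, ((j : Int) + 1 + (u : ℕ)) = ((j + 1 + u : ℕ) : Int) := by
    intro u; push_cast; ring
  simp only [hcast, PySem.List.pyGetD_natCast]
  have hright := PySem.List.foldl_append_if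
    (fun u : ℕ => decide (arr.getD (j + 1 + u) 0 > arr.getD j 0))
    (fun u : ℕ => arr.getD (j + 1 + u) 0) (List.range (arr.length - (j + 1))) []
  simp only [decide_eq_true_eq, List.nil_append] at hright
  rw [hright]
  -- left list
  rw [PySem.List.pyRange_zero_natCast, List.foldl_map]
  simp only [PySem.List.pyGetD_natCast]
  have hleft := PySem.List.foldl_append_if
    (fun i : ℕ => decide (arr.getD i 0 > arr.getD j 0)) (fun i : ℕ => arr.getD i 0) (List.range j) []
  simp only [decide_eq_true_eq, List.nil_append] at hleft
  rw [hleft]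
  -- outer fold: count plus a sum
  rw [PySem.List.foldl_add]
  congr 1
  rw [List.map_map, pv_sum_map_filter]
  have hlist : ∀ F : ℕ → Int, ((List.range j).map F).sum = ∑ i ∈ Finset.range j, F i :=
    fun F => rfl
  rw [hlist]
  unfold pvTA
  apply Finset.sum_congr rfl
  intro i _
  by_cases hp : arr.getD i 0 > arr.getD j 0
  · simp only [Function.comp, hp, decide_true, if_true]
    rw [pv_bisect_countP _ _ (PySem.List.sorted_pairwise _ _),
        (PySem.List.sorted_perm _ _ _).countP_eq,
        List.countP_map, List.countP_filter, pv_countP_sum,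
        Finset.sum_Ico_eq_sum_range]
    apply Finset.sum_congr rfl
    intro u _
    simp only [Function.comp, Bool.and_eq_true, decide_eq_true_eq, pvG, pvA]
    exact if_congr and_comm rfl rfl
  · simp only [Function.comp, hp, decide_false]
    symm
    apply Finset.sum_eq_zero
    intro k _
    simp only [pvG, pvA]
    rw [if_neg]
    rintro ⟨h1, h2⟩
    exact hp (by omega)

-- A computes the sum of its per-j contributions
theorem pv_A_eq_sum (arr : List Int) :
    count_triplets_final_breakthrough arr
      = ∑ t ∈ Finset.range (arr.length - 2), pvTA arr (1 + t) := by
  have main : ∀ (m : ℕ) (t : Int),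
      (List.range m).foldl
        (fun (count : Int) (tt : ℕ) =>
          let aj := PySem.List.pyGetD arr (1 + (tt : Int)) 0
          let left_greater := (PySem.List.pyRange 0 (1 + (tt : Int)) 1).foldl
            (fun acc i => if PySem.List.pyGetD arr i 0 > aj then acc ++ [PySem.List.pyGetD arr i 0] else acc) []
          let right_greater := (PySem.List.pyRange ((1 + (tt : Int)) + 1) (arr.length : Int) 1).foldl
            (fun acc k => if PySem.List.pyGetD arr k 0 > aj then acc ++ [PySem.List.pyGetD arr k 0] else acc) []
          let right_sorted := PySem.List.sorted right_greater (fun x => x)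
          left_greater.foldl (fun c ai => c + (PySem.List.bisectLeft right_sorted ai : Int)) count)
        t
      = t + ∑ tt ∈ Finset.range m, pvTA arr (1 + tt) := by
    intro m
    induction m with
    | zero => intro t; simp
    | succ m ih =>
      intro t
      rw [List.range_succ, List.foldl_append, ih, Finset.sum_range_succ]
      simp only [List.foldl_cons, List.foldl_nil]
      exact (pv_bodyA arr (1 + m) (t + ∑ tt ∈ Finset.range m, pvTA arr (1 + tt))).trans
        (add_assoc t _ _)
  have h0 := main (arr.length - 2) 0
  unfold count_triplets_final_breakthrough
  simp only [PySem.List.pyRange_one 1 ((arr.length : Int) - 1), List.foldl_map,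
    show (((arr.length : Int) - 1) - 1).toNat = arr.length - 2 by omega]
  exact h0.trans (by rw [zero_add])

-- A equals the cube sum
theorem pv_A_eq_cube (arr : List Int) :
    count_triplets_final_breakthrough arr = pvCube arr := by
  rw [pv_A_eq_sum]
  have h1 : ∑ j ∈ Finset.Ico 1 (arr.length - 1), pvTA arr j
      = ∑ t ∈ Finset.range (arr.length - 2), pvTA arr (1 + t) := by
    rw [Finset.sum_Ico_eq_sum_range]
    congr 1
  rw [← h1]
  have h2 : ∑ j ∈ Finset.Ico 1 (arr.length - 1), pvTA arr j
      = ∑ j ∈ Finset.range arr.length, pvTA arr j := by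
    apply Finset.sum_subset
    · intro x hx
      simp only [Finset.mem_Ico] at hx
      simp only [Finset.mem_range]
      omega
    · intro j hj hnot
      simp only [Finset.mem_range] at hj
      simp only [Finset.mem_Ico, not_and, not_lt] at hnot
      by_cases hj0 : j = 0
      · subst hj0; simp [pvTA]
      · unfold pvTA
        apply Finset.sum_eq_zero
        intro i _
        rw [Finset.Ico_eq_empty (by omega), Finset.sum_empty]
  rw [h2]
  unfold pvCube pvTA
  apply Finset.sum_congr rfl
  intro j hj
  rw [pv_sum_ext _ j arr.length (le_of_lt (Finset.mem_range.1 hj))]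
  apply Finset.sum_congr rfl
  intro i _
  by_cases hij : i < j
  · rw [if_pos hij, pv_sum_Ico_ext]
    apply Finset.sum_congr rfl
    intro k _
    by_cases hjk : j < k
    · rw [if_pos hjk, if_pos ⟨hij, hjk⟩]
    · rw [if_neg hjk, if_neg (by tauto)]
  · rw [if_neg hij]
    symm
    apply Finset.sum_eq_zero
    intro k _
    rw [if_neg (by tauto)]

-- ===== VERDICT (by name: the statement is the Claim_ definition above) =====
theorem count_triplets_final_breakthrough_spec : Claim_equal_count_triplets_final_breakthrough := by
  intro arr _
  unfold Spec_count_triplets_final_breakthrough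
  rw [pv_A_eq_cube, pv_B_eq_cube]
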